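-- pv_equiv track=rewrite | github.com/Inusette/Advent-of-Code | Advent_2018/Day_10/Day_10.py | project_positions
-- ===== SOURCE A (Python) =====
-- def project_positions(x_positions, y_positions):
--     """
--     plots the given second positions to a grid, with # noting a position and . being empty
--     adds +2 +3 +4 to the edges, so that it's pretty
--     :param x_positions: {pos_count: x}
--     :param y_positions: {pos_count: y}
--     :return: list of lists with strings
--     """
--     # extract the x and y values
--     x_values = list(x_positions.values())
--     y_values = list(y_positions.values())
--
--     # find the minimum values
--     min_x = min(x_values)
--     min_y = min(y_values)
--
--     # increment all positions, so that there are no negative numbers.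
--     for idx in range(len(x_values)):
--         x_values[idx] += abs(min_x) + 2
--
--     for idx in range(len(y_values)):
--         y_values[idx] += abs(min_y) + 2
--
--     # create a list with all elements being .
--     y_axe = ['.'] * (max(y_values) + 3)
--
--     plot = []
--
--     # create a grid using the y_axe lists
--     for i in range(max(x_values) + 4):
--         plot.append(list(y_axe))
--
--     # find the position in the 2d list and change it to #
--     for idx in range(len(x_values)):
--         x = x_values[idx]
--         y = y_values[idx]
--
--         plot[x][y] = '#'
--
--     return plot
-- ===== SOURCE B (Python) =====
-- def project_positions(x_positions, y_positions):
--     """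
--     plots the given second positions to a grid, with # noting a position and . being empty
--     adds +2 +3 +4 to the edges, so that it's pretty
--     """
--     x_values = list(x_positions.values())
--     y_values = list(y_positions.values())
--
--     # constant shifts that make every coordinate non-negative
--     dx = abs(min(x_values)) + 2
--     dy = abs(min(y_values)) + 2
--
--     # collect the shifted points once
--     points = set()
--     for idx in range(len(x_values)):
--         points.add((x_values[idx] + dx, y_values[idx] + dy))
--
--     rows = max(x_values) + dx + 4
--     cols = max(y_values) + dy + 3
--
--     # paint every cell by membership instead of filling then stamping
--     return [['#' if (i, j) in points else '.' for j in range(cols)]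
--             for i in range(rows)]
-- ===== Notes on version B (the rewrite author's own statement) =====
-- stated objective: idiomatic
-- what changed: Instead of materialising shifted coordinate lists, filling a '.'-grid row by row and then stamping '#' at each point by in-place 2D index assignment, B collects the shifted points into a set in one pass and builds the grid directly with a nested comprehension deciding each cell by set membership.
import Mathlib
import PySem

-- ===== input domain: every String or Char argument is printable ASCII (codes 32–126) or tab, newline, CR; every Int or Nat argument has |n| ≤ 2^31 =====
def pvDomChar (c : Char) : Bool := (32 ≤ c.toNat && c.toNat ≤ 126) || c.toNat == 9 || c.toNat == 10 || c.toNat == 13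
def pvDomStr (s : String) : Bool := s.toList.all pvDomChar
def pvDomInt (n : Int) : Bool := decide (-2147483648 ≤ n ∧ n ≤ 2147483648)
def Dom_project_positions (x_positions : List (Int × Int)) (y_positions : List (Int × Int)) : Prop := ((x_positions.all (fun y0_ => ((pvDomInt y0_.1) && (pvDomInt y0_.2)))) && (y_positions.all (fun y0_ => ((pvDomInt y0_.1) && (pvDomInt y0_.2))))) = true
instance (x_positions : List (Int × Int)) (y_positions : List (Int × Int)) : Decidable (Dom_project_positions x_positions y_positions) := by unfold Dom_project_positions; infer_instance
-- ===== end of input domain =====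

-- B replaces A's fill-then-stamp grid construction (build rows of '.', then 2D index
-- assignment per point) by collecting the shifted points into a set and painting every
-- cell by membership in a nested comprehension; same return value on all admitted inputs.

-- ===== PORT A =====
def project_positions (x_positions : List (Int × Int)) (y_positions : List (Int × Int)) : List (List String) :=
  let x_values := (PySem.Dict.ofList x_positions).values
  let y_values := (PySem.Dict.ofList y_positions).values
  match PySem.List.min? x_values (fun v => v), PySem.List.min? y_values (fun v => v) with
  | some min_x, some min_y =>
    let x_values := (PySem.List.pyRange 0 (PySem.List.len x_values) 1).foldl
        (fun l idx => PySem.List.pySetD l idx (PySem.List.pyGetD l idx 0 + (|min_x| + 2))) x_values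
    let y_values := (PySem.List.pyRange 0 (PySem.List.len y_values) 1).foldl
        (fun l idx => PySem.List.pySetD l idx (PySem.List.pyGetD l idx 0 + (|min_y| + 2))) y_values
    match PySem.List.max? y_values (fun v => v), PySem.List.max? x_values (fun v => v) with
    | some max_y, some max_x =>
      let y_axe := PySem.List.pyRepeat ["."] (max_y + 3)
      let plot := (PySem.List.pyRange 0 (max_x + 4) 1).foldl (fun p _ => p ++ [y_axe]) []
      (PySem.List.pyRange 0 (PySem.List.len x_values) 1).foldl
        (fun p idx =>
          let x := PySem.List.pyGetD x_values idx 0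
          let y := PySem.List.pyGetD y_values idx 0
          PySem.List.pySetD p x (PySem.List.pySetD (PySem.List.pyGetD p x []) y "#")) plot
    | _, _ => []
  | _, _ => []

-- ===== PORT B =====
def project_positions_alt (x_positions : List (Int × Int)) (y_positions : List (Int × Int)) : List (List String) :=
  let x_values := (PySem.Dict.ofList x_positions).values
  let y_values := (PySem.Dict.ofList y_positions).values
  match PySem.List.min? x_values (fun v => v) with
  | none => []
  | some mnx =>
    match PySem.List.min? y_values (fun v => v) with
    | none => []
    | some mny =>
      let dx := |mnx| + 2
      let dy := |mny| + 2
      let points : PySem.Set (Int × Int) :=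
        (PySem.List.pyRange 0 (PySem.List.len x_values) 1).foldl
          (fun s idx => PySem.Set.add s (PySem.List.pyGetD x_values idx 0 + dx, PySem.List.pyGetD y_values idx 0 + dy)) PySem.Set.empty
      match PySem.List.max? x_values (fun v => v) with
      | none => []
      | some mxx =>
        match PySem.List.max? y_values (fun v => v) with
        | none => []
        | some mxy =>
          (PySem.List.pyRange 0 (mxx + dx + 4) 1).map (fun i =>
            (PySem.List.pyRange 0 (mxy + dy + 3) 1).map (fun j =>
              if PySem.Set.contains points (i, j) then "#" else "."))

-- ===== PRECONDITION & SPEC =====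
-- Pre_ excludes exactly the inputs where Python A raises: an empty dict makes min() raise
-- ValueError, and a y-dict with fewer entries than the x-dict makes y_values[idx] raise
-- IndexError in the stamping loop.
def Pre_project_positions (x_positions : List (Int × Int)) (y_positions : List (Int × Int)) : Prop :=
  (PySem.Dict.ofList x_positions).values ≠ [] ∧
  (PySem.Dict.ofList y_positions).values ≠ [] ∧
  (PySem.Dict.ofList x_positions).values.length ≤ (PySem.Dict.ofList y_positions).values.length
instance (x_positions : List (Int × Int)) (y_positions : List (Int × Int)) : Decidable (Pre_project_positions x_positions y_positions) := by unfold Pre_project_positions; infer_instance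

def pvWitness_project_positions : (List (Int × Int)) × (List (Int × Int)) := ([(0, 0)], [(0, 0)])

def Spec_project_positions (x_positions : List (Int × Int)) (y_positions : List (Int × Int)) (out : List (List String)) : Prop := out = project_positions_alt x_positions y_positions
instance (x_positions : List (Int × Int)) (y_positions : List (Int × Int)) (out : List (List String)) : Decidable (Spec_project_positions x_positions y_positions out) := by unfold Spec_project_positions; infer_instance

-- ===== CLAIM (what is proved, stated in full; the proofs are below) =====
def Claim_equal_project_positions : Prop := ∀ (x_positions : List (Int × Int)) (y_positions : List (Int × Int)), Dom_project_positions x_positions y_positions → Pre_project_positions x_positions y_positions → Spec_project_positions x_positions y_positions (project_positions x_positions y_positions)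

-- ===== LEMMAS AND PROOFS =====

theorem shift_aux (c : Int) : ∀ (n : Nat) (l : List Int), n ≤ l.length →
    (PySem.List.pyRange 0 (n : Int) 1).foldl
      (fun l' idx => PySem.List.pySetD l' idx (PySem.List.pyGetD l' idx 0 + c)) l
    = (l.take n).map (· + c) ++ l.drop n := by
  intro n
  induction n with
  | zero => intro l h; simp [PySem.List.pyRange_one_eq_nil]
  | succ n ih =>
    intro l h
    have h0 : (0:Int) ≤ (n:Int) := by positivity
    have hcast : ((n+1 : Nat) : Int) = (n : Int) + 1 := by push_cast; ring
    rw [hcast, PySem.List.pyRange_one_succ_right h0, List.foldl_append]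
    rw [ih l (by omega)]
    have hn : n < l.length := by omega
    have hget : PySem.List.pyGetD ((l.take n).map (· + c) ++ l.drop n) (n : Int) 0 = l[n] := by
      rw [PySem.List.pyGetD_natCast]
      rw [List.getD_eq_getElem?_getD, List.getElem?_append_right (by simp [hn.le])]
      simp [Nat.min_eq_left hn.le, hn]
    simp only [List.foldl_cons, List.foldl_nil, hget, PySem.List.pySetD_natCast]
    have hdrop : l.drop n = l[n] :: l.drop (n+1) := (List.drop_eq_getElem_cons hn)
    rw [hdrop]
    rw [List.set_append_right _ _ (by simp [Nat.min_eq_left hn.le])]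
    have hlen : ((l.take n).map (· + c)).length = n := by simp [Nat.min_eq_left hn.le]
    rw [hlen]
    simp only [Nat.sub_self, List.set_cons_zero]
    have hts : List.take (n+1) (l.map (· + c)) = List.take n (l.map (· + c)) ++ [l[n] + c] := by
      rw [List.take_add_one, List.getElem?_eq_getElem (by simpa using hn)]
      simp
    rw [List.map_take, List.map_take, hts]
    simp

theorem shift_eq_map (l : List Int) (c : Int) :
    (PySem.List.pyRange 0 (PySem.List.len l) 1).foldl
      (fun l' idx => PySem.List.pySetD l' idx (PySem.List.pyGetD l' idx 0 + c)) l
    = l.map (· + c) := by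
  have h := shift_aux c l.length l le_rfl
  simpa [PySem.List.len_eq] using h

theorem build_grid_eq_replicate {α β : Type} (l : List α) (row : β) :
    ∀ acc : List β, l.foldl (fun p _ => p ++ [row]) acc = acc ++ List.replicate l.length row := by
  induction l with
  | nil => intro acc; simp
  | cons x t ih => intro acc; simp [ih, List.replicate_succ]

theorem foldl_max_map_add (c : Int) : ∀ (t : List Int) (a : Int),
    (t.map (· + c)).foldl max (a + c) = t.foldl max a + c := by
  intro t
  induction t with
  | nil => intro a; simp
  | cons x t ih =>
    intro a
    simp only [List.map_cons, List.foldl_cons]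
    rw [max_add_add_right, ih]

theorem max_map_add (l : List Int) (c M : Int) (h : PySem.List.max? l (fun v => v) = some M) :
    PySem.List.max? (l.map (· + c)) (fun v => v) = some (M + c) := by
  cases l with
  | nil => simp [PySem.List.max?] at h
  | cons x t =>
    rw [PySem.List.max?_id_cons] at h
    rw [List.map_cons, PySem.List.max?_id_cons, foldl_max_map_add]
    simpa using congrArg (fun o => Option.map (· + c) o) h

theorem range_fold2 {γ : Type} (step : γ → Int × Int → γ) :
    ∀ (n : Nat) (u v : List Int), n ≤ u.length → n ≤ v.length → ∀ (g : γ),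
    (PySem.List.pyRange 0 (n : Int) 1).foldl
      (fun p idx => step p (PySem.List.pyGetD u idx 0, PySem.List.pyGetD v idx 0)) g
    = ((u.zip v).take n).foldl step g := by
  intro n
  induction n with
  | zero => intro u v h1 h2 g; simp [PySem.List.pyRange_one_eq_nil]
  | succ n ih =>
    intro u v h1 h2 g
    have hcast : ((n+1 : Nat) : Int) = (n : Int) + 1 := by push_cast; ring
    rw [hcast, PySem.List.pyRange_one_succ_right (by positivity), List.foldl_append,
        ih u v (by omega) (by omega) g]
    have hz : n < (u.zip v).length := by simp [List.length_zip]; omega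
    rw [List.take_add_one, List.getElem?_eq_getElem hz, List.foldl_append]
    simp [List.getElem_zip, PySem.List.pyGetD_natCast,
          List.getD_eq_getElem?_getD, List.getElem?_eq_getElem (show n < u.length by omega),
          List.getElem?_eq_getElem (show n < v.length by omega)]

theorem stamp_step (R C : Nat) (f : Nat → Nat → String) (a b : Int)
    (ha0 : 0 ≤ a) (haR : a < (R : Int)) (hb0 : 0 ≤ b) (hbC : b < (C : Int)) :
    PySem.List.pySetD ((List.range R).map (fun (i : Nat) => (List.range C).map (f i))) a
      (PySem.List.pySetD
        (PySem.List.pyGetD ((List.range R).map (fun (i : Nat) => (List.range C).map (f i))) a []) b "#")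
    = (List.range R).map (fun (i : Nat) => (List.range C).map (fun (j : Nat) =>
        if (a = (i : Int) ∧ b = (j : Int)) then "#" else f i j)) := by
  have haR' : a.toNat < R := by omega
  have hbC' : b.toNat < C := by omega
  rw [PySem.List.pyGetD_of_nonneg _ _ ha0, PySem.List.pySetD_of_nonneg _ _ hb0,
      PySem.List.pySetD_of_nonneg _ _ ha0]
  rw [List.getD_eq_getElem?_getD, List.getElem?_eq_getElem (by simpa using haR')]
  apply List.ext_getElem (by simp)
  intro i hi1 hi2
  simp only [List.getElem_set, List.getElem_map, List.getElem_range] at *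
  by_cases hia : a.toNat = i
  · subst hia
    simp only [ite_true, Option.getD_some] at *
    apply List.ext_getElem (by simp)
    intro j hj1 hj2
    simp only [List.getElem_set, List.getElem_map, List.getElem_range] at *
    by_cases hjb : b.toNat = j
    · subst hjb; rw [if_pos rfl, if_pos ⟨by omega, by omega⟩]
    · rw [if_neg hjb, if_neg (by omega)]
  · rw [if_neg hia]
    apply List.ext_getElem (by simp)
    intro j hj1 hj2
    simp only [List.getElem_map, List.getElem_range] at *
    rw [if_neg (by omega)]

theorem stamp_fold (R C : Nat) : ∀ (L : List (Int × Int)) (f : Nat → Nat → String),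
    (∀ p ∈ L, 0 ≤ p.1 ∧ p.1 < (R : Int) ∧ 0 ≤ p.2 ∧ p.2 < (C : Int)) →
    L.foldl (fun g q => PySem.List.pySetD g q.1
        (PySem.List.pySetD (PySem.List.pyGetD g q.1 []) q.2 "#"))
      ((List.range R).map (fun (i : Nat) => (List.range C).map (f i)))
    = (List.range R).map (fun (i : Nat) => (List.range C).map (fun (j : Nat) =>
        if ∃ q ∈ L, q.1 = (i : Int) ∧ q.2 = (j : Int) then "#" else f i j)) := by
  intro L
  induction L with
  | nil => intro f hb; simp
  | cons q L ih =>
    intro f hb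
    obtain ⟨hq0, hqR, hq2, hqC⟩ := hb q (by simp)
    rw [List.foldl_cons, stamp_step R C f q.1 q.2 hq0 hqR hq2 hqC,
        ih _ (fun p hp => hb p (by simp [hp]))]
    apply List.ext_getElem (by simp)
    intro i hi1 hi2
    simp only [List.getElem_map, List.getElem_range]
    apply List.ext_getElem (by simp)
    intro j hj1 hj2
    simp only [List.getElem_map, List.getElem_range]
    by_cases h1 : ∃ p ∈ L, p.1 = (i : Int) ∧ p.2 = (j : Int)
    · rw [if_pos h1, if_pos (by obtain ⟨p, hp, he⟩ := h1; exact ⟨p, by simp [hp], he⟩)]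
    · rw [if_neg h1]
      by_cases h2 : q.1 = (i : Int) ∧ q.2 = (j : Int)
      · rw [if_pos h2, if_pos ⟨q, by simp, h2⟩]
      · rw [if_neg h2]
        rw [if_neg ?_]
        rintro ⟨p, hp, he⟩
        rcases List.mem_cons.mp hp with rfl | hp'
        · exact h2 he
        · exact h1 ⟨p, hp', he⟩
theorem range_fold2A (n : Nat) (u v : List Int) (h1 : u.length = n) (h2 : n ≤ v.length)
    (g : List (List String)) :
    (PySem.List.pyRange 0 (n : Int) 1).foldl
      (fun p idx => PySem.List.pySetD p (PySem.List.pyGetD u idx 0)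
        (PySem.List.pySetD (PySem.List.pyGetD p (PySem.List.pyGetD u idx 0) [])
          (PySem.List.pyGetD v idx 0) "#")) g
    = (u.zip v).foldl (fun g q => PySem.List.pySetD g q.1
        (PySem.List.pySetD (PySem.List.pyGetD g q.1 []) q.2 "#")) g := by
  have h := range_fold2 (fun g q => PySem.List.pySetD g q.1
      (PySem.List.pySetD (PySem.List.pyGetD g q.1 []) q.2 "#")) n u v h1.ge h2 g
  rw [List.take_of_length_le (by simp [List.length_zip]; omega)] at h
  exact h

theorem main_eq (x_positions y_positions : List (Int × Int))
    (hx : (PySem.Dict.ofList x_positions).values ≠ [])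
    (hy : (PySem.Dict.ofList y_positions).values ≠ [])
    (hlen : (PySem.Dict.ofList x_positions).values.length ≤ (PySem.Dict.ofList y_positions).values.length) :
    project_positions x_positions y_positions = project_positions_alt x_positions y_positions := by
  unfold project_positions project_positions_alt
  generalize hgx : (PySem.Dict.ofList x_positions).values = xv at *
  generalize hgy : (PySem.Dict.ofList y_positions).values = yv at *
  rcases hmn : PySem.List.min? xv (fun v => v) with _ | mnx
  · exact absurd ((PySem.List.min?_eq_none_iff xv _).mp hmn) hx
  rcases hmny : PySem.List.min? yv (fun v => v) with _ | mny
  · exact absurd ((PySem.List.min?_eq_none_iff yv _).mp hmny) hy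
  rcases hmxx : PySem.List.max? xv (fun v => v) with _ | mxx
  · exact absurd ((PySem.List.max?_eq_none_iff xv _).mp hmxx) hx
  rcases hmxy : PySem.List.max? yv (fun v => v) with _ | mxy
  · exact absurd ((PySem.List.max?_eq_none_iff yv _).mp hmxy) hy
  dsimp only
  rw [hmn]
  dsimp only
  rw [hmny]
  dsimp only
  rw [hmxx]
  dsimp only
  rw [hmxy]
  dsimp only
  rw [shift_eq_map, shift_eq_map,
      max_map_add yv _ _ hmxy, max_map_add xv _ _ hmxx]
  dsimp only
  rw [build_grid_eq_replicate]
  simp only [List.nil_append, PySem.List.length_pyRange_one, PySem.List.pyRepeat_singleton,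
             PySem.List.len_eq, List.length_map, sub_zero]
  -- abbreviations
  obtain ⟨x0, hx0⟩ := List.exists_mem_of_ne_nil xv hx
  have hxb : mnx ≤ x0 ∧ x0 ≤ mxx :=
    ⟨PySem.List.min?_isMin hmn x0 hx0, PySem.List.max?_isMax hmxx x0 hx0⟩
  obtain ⟨y0, hy0⟩ := List.exists_mem_of_ne_nil yv hy
  have hyb : mny ≤ y0 ∧ y0 ≤ mxy :=
    ⟨PySem.List.min?_isMin hmny y0 hy0, PySem.List.max?_isMax hmxy y0 hy0⟩
  have habsx : -mnx ≤ |mnx| ∧ mnx ≤ |mnx| := ⟨neg_le_abs mnx, le_abs_self mnx⟩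
  have habsy : -mny ≤ |mny| ∧ mny ≤ |mny| := ⟨neg_le_abs mny, le_abs_self mny⟩
  set ax := |mnx| with hax
  set ay := |mny| with hay
  have hRC : ((mxx + (ax + 2) + 4).toNat : Int) = mxx + (ax + 2) + 4 ∧
      ((mxy + (ay + 2) + 3).toNat : Int) = mxy + (ay + 2) + 3 := by
    constructor <;> omega
  rw [range_fold2A xv.length (xv.map (· + (ax + 2))) (yv.map (· + (ay + 2)))
        (by simp) (by simpa using hlen) _]
  set L := (xv.map (· + (ax + 2))).zip (yv.map (· + (ay + 2))) with hLdef
  set R := (mxx + (ax + 2) + 4).toNat with hRdef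
  set C := (mxy + (ay + 2) + 3).toNat with hCdef
  have hLlen : L.length = xv.length := by simp [hLdef, List.length_zip]; omega
  have hb : ∀ p ∈ L, 0 ≤ p.1 ∧ p.1 < (R : Int) ∧ 0 ≤ p.2 ∧ p.2 < (C : Int) := by
    intro p hp
    obtain ⟨k, hkL, rfl⟩ := List.mem_iff_getElem.mp hp
    have hk : k < xv.length := by omega
    have hk2 : k < yv.length := by omega
    have h1 := PySem.List.min?_isMin hmn xv[k] (List.getElem_mem hk)
    have h2 := PySem.List.max?_isMax hmxx xv[k] (List.getElem_mem hk)
    have h3 := PySem.List.min?_isMin hmny yv[k] (List.getElem_mem hk2)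
    have h4 := PySem.List.max?_isMax hmxy yv[k] (List.getElem_mem hk2)
    simp only at h1 h2 h3 h4
    simp only [hLdef, List.getElem_zip, List.getElem_map]
    refine ⟨by omega, by omega, by omega, by omega⟩
  rw [show List.replicate R (List.replicate C ".")
        = (List.range R).map (fun (i : Nat) => (List.range C).map (fun (_ : Nat) => ".")) by simp]
  rw [stamp_fold R C L (fun _ _ => ".") hb]
  rw [PySem.List.pyRange_one 0 (mxx + (ax + 2) + 4), PySem.List.pyRange_one 0 (mxy + (ay + 2) + 3)]
  simp only [List.map_map, sub_zero, ← hRdef, ← hCdef]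
  apply List.ext_getElem (by simp)
  intro i hi1 hi2
  simp only [List.getElem_map, List.getElem_range, Function.comp_apply]
  apply List.ext_getElem (by simp)
  intro j hj1 hj2
  simp only [List.getElem_map, List.getElem_range, Function.comp_apply, zero_add]
  have hmem : (((i : Int), (j : Int)) ∈ (PySem.List.pyRange 0 (xv.length : Int) 1).foldl
        (fun s idx => PySem.Set.add s
          (PySem.List.pyGetD xv idx 0 + (ax + 2), PySem.List.pyGetD yv idx 0 + (ay + 2)))
        PySem.Set.empty)
      ↔ ∃ q ∈ L, q.1 = (i : Int) ∧ q.2 = (j : Int) := by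
    have h : (((i : Int), (j : Int)) ∈ (PySem.List.pyRange 0 (xv.length : Int) 1).foldl
          (fun s idx => PySem.Set.add s
            (PySem.List.pyGetD xv idx 0 + (ax + 2), PySem.List.pyGetD yv idx 0 + (ay + 2)))
          PySem.Set.empty)
        ↔ ((i : Int), (j : Int)) ∈ (PySem.Set.empty : PySem.Set (Int × Int)) ∨
          ∃ b ∈ PySem.List.pyRange 0 (xv.length : Int) 1,
            ((i : Int), (j : Int)) = (PySem.List.pyGetD xv b 0 + (ax + 2), PySem.List.pyGetD yv b 0 + (ay + 2)) :=
      PySem.Set.mem_foldl_add _ _ _ _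
    rw [h]
    constructor
    · rintro (h0 | ⟨b, hbmem, heq⟩)
      · exact absurd h0 (by simp [PySem.Set.empty])
      · rw [PySem.List.mem_pyRange_one] at hbmem
        obtain ⟨hb0, hbn⟩ := hbmem
        have hk : b.toNat < xv.length := by omega
        have hk2 : b.toNat < yv.length := by omega
        have e1 : PySem.List.pyGetD xv b 0 = xv[b.toNat] := by
          rw [PySem.List.pyGetD_of_nonneg _ _ hb0, List.getD_eq_getElem?_getD,
              List.getElem?_eq_getElem hk]; rfl
        have e2 : PySem.List.pyGetD yv b 0 = yv[b.toNat] := by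
          rw [PySem.List.pyGetD_of_nonneg _ _ hb0, List.getD_eq_getElem?_getD,
              List.getElem?_eq_getElem hk2]; rfl
        rw [e1, e2] at heq
        obtain ⟨he1, he2⟩ := Prod.ext_iff.mp heq
        refine ⟨L[b.toNat]'(by omega), List.getElem_mem _, ?_⟩
        simp only [hLdef, List.getElem_zip, List.getElem_map]
        exact ⟨he1.symm, he2.symm⟩
    · rintro ⟨q, hq, hq1, hq2⟩
      right
      obtain ⟨k, hkL, rfl⟩ := List.mem_iff_getElem.mp hq
      have hk : k < xv.length := by omega
      have hk2 : k < yv.length := by omega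
      refine ⟨(k : Int), ?_, ?_⟩
      · rw [PySem.List.mem_pyRange_one]; exact ⟨by positivity, by exact_mod_cast hk⟩
      · have e1 : PySem.List.pyGetD xv ((k : Nat) : Int) 0 = xv[k] := by
          rw [PySem.List.pyGetD_natCast, List.getD_eq_getElem?_getD, List.getElem?_eq_getElem hk]; rfl
        have e2 : PySem.List.pyGetD yv ((k : Nat) : Int) 0 = yv[k] := by
          rw [PySem.List.pyGetD_natCast, List.getD_eq_getElem?_getD, List.getElem?_eq_getElem hk2]; rfl
        rw [e1, e2]
        simp only [hLdef, List.getElem_zip, List.getElem_map] at hq1 hq2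
        exact Prod.ext_iff.mpr ⟨hq1.symm, hq2.symm⟩
  by_cases hE : ∃ q ∈ L, q.1 = ((i : Nat) : Int) ∧ q.2 = ((j : Nat) : Int)
  · rw [if_pos hE, if_pos (by rw [PySem.Set.contains_iff]; exact hmem.mpr hE)]
  · rw [if_neg hE, if_neg ?_]
    intro hc
    rw [PySem.Set.contains_iff] at hc
    exact hE (hmem.mp hc)

-- ===== VERDICT (by name: the statement is the Claim_ definition above) =====
theorem project_positions_spec : Claim_equal_project_positions := by
  intro x_positions y_positions _ hpre
  unfold Spec_project_positions
  exact main_eq x_positions y_positions hpre.1 hpre.2.1 hpre.2.2
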